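-- pv_equiv track=rewrite | github.com/pypi-data/pypi-mirror-88 | packages/nabu/nabu-2020.5.0-py3-none-any.whl/nabu/testutils.py | generate_tests_scenarios
-- ===== SOURCE A (Python) =====
-- from itertools import product
--
-- def generate_tests_scenarios(configurations):
--     """
--     Generate "scenarios" of tests.
--
--     The parameter is a dictionary where:
--       - the key is the name of a parameter
--       - the value is a list of possible parameters
--
--     This function returns a list of dictionary where:
--       - the key is the name of a parameter
--       - the value is one value of this parameter
--     """
--     scenarios = [
--         {
--             key: val
--             for key, val in zip(configurations.keys(), p_)
--         }
--         for p_ in product(*configurations.values())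
--     ]
--     return scenarios
-- ===== SOURCE B (Python) =====
-- def generate_tests_scenarios(configurations):
--     scenarios = [{}]
--     for key, values in configurations.items():
--         scenarios = [{**s, key: v} for s in scenarios for v in values]
--     return scenarios
-- ===== Notes on version B (the rewrite author's own statement) =====
-- stated objective: alternative
-- what changed: Replaces itertools.product plus a zip-based dict comprehension by an incremental build: start from a single empty scenario and extend every partial scenario with each value of the current key, one key at a time; Pre_ only excludes association lists with duplicate keys, which cannot arise from a Python dict argument.
import Mathlib
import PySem

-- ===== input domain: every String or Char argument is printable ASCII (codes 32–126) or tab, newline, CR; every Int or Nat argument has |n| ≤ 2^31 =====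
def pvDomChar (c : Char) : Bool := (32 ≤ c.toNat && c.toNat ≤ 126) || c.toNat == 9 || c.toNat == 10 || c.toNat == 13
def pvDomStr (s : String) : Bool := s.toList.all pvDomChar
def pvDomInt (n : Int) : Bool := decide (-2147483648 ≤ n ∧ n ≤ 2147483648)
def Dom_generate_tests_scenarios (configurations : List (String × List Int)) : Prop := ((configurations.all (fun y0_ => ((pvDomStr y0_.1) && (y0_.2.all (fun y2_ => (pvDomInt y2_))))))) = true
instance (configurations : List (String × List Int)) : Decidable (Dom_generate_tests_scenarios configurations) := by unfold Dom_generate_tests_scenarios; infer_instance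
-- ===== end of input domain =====

-- B builds the Cartesian product incrementally (one key at a time) instead of
-- itertools.product + a zip-based dict comprehension; objective: alternative decomposition.

-- ===== PORT A =====

-- Python dict update semantics on an assoc list: overwrite in place, new keys append.
def pyDictInsert (d : List (String × Int)) (k : String) (v : Int) : List (String × Int) :=
  if d.any (fun kv => kv.1 == k) then
    d.map (fun kv => if kv.1 == k then (kv.1, v) else kv)
  else d ++ [(k, v)]

-- itertools.product(*lists): leftmost factor varies slowest.
def pyProduct : List (List Int) → List (List Int)
  | [] => [[]]
  | l :: rest => l.flatMap (fun x => (pyProduct rest).map (x :: ·))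

def generate_tests_scenarios (configurations : List (String × List Int)) : List (List (String × Int)) :=
  (pyProduct (configurations.map Prod.snd)).map
    (fun p_ => ((configurations.map Prod.fst).zip p_).foldl
      (fun d kv => pyDictInsert d kv.1 kv.2) [])

-- ===== PORT B =====
def generate_tests_scenarios_alt (configurations : List (String × List Int)) : List (List (String × Int)) :=
  configurations.foldl
    (fun scenarios kv => scenarios.flatMap (fun s => kv.2.map (fun v => pyDictInsert s kv.1 v)))
    [[]]

-- ===== PRECONDITION & SPEC =====
-- Pre_ excludes association lists with duplicate keys: a Python dict argument can never
-- have duplicate keys, so such lists correspond to no input of the Python programs.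
def Pre_generate_tests_scenarios (configurations : List (String × List Int)) : Prop :=
  (configurations.map Prod.fst).Nodup

instance (configurations : List (String × List Int)) : Decidable (Pre_generate_tests_scenarios configurations) := by
  unfold Pre_generate_tests_scenarios; infer_instance

def pvWitness_generate_tests_scenarios : (List (String × List Int)) := [("a", [1, 2]), ("b", [3])]

def Spec_generate_tests_scenarios (configurations : List (String × List Int)) (out : List (List (String × Int))) : Prop := out = generate_tests_scenarios_alt configurations
instance (configurations : List (String × List Int)) (out : List (List (String × Int))) : Decidable (Spec_generate_tests_scenarios configurations out) := by unfold Spec_generate_tests_scenarios; infer_instance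

-- ===== CLAIM (what is proved, stated in full; the proofs are below) =====
def Claim_equal_generate_tests_scenarios : Prop := ∀ (configurations : List (String × List Int)), Dom_generate_tests_scenarios configurations → Pre_generate_tests_scenarios configurations → Spec_generate_tests_scenarios configurations (generate_tests_scenarios configurations)

-- ===== LEMMAS AND PROOFS =====

-- Inserting a fresh key appends.
theorem pyDictInsert_fresh (d : List (String × Int)) (k : String) (v : Int)
    (h : k ∉ d.map Prod.fst) : pyDictInsert d k v = d ++ [(k, v)] := by
  unfold pyDictInsert
  rw [if_neg]
  intro hc
  simp only [List.any_eq_true, beq_iff_eq] at hc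
  obtain ⟨kv, hm, he⟩ := hc
  exact h (he ▸ List.mem_map.mpr ⟨kv, hm, rfl⟩)

-- A's dict comprehension over a zip of distinct fresh keys is the zip itself.
theorem foldl_insert_zip (keys : List String) (p : List Int) (d : List (String × Int))
    (hnd : keys.Nodup) (hdisj : ∀ k ∈ keys, k ∉ d.map Prod.fst) :
    (keys.zip p).foldl (fun d kv => pyDictInsert d kv.1 kv.2) d = d ++ keys.zip p := by
  induction keys generalizing p d with
  | nil => simp
  | cons k ks ih =>
    cases p with
    | nil => simp
    | cons v vs =>
      simp only [List.zip_cons_cons, List.foldl_cons]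
      rw [pyDictInsert_fresh d k v (hdisj k (List.mem_cons_self))]
      rw [ih vs (d ++ [(k, v)]) hnd.of_cons]
      · simp
      · intro k' hk'
        simp only [List.map_append, List.mem_append, List.map_cons, List.map_nil,
          List.mem_singleton, not_or]
        exact ⟨hdisj k' (List.mem_cons_of_mem _ hk'),
          fun he => (List.nodup_cons.mp hnd).1 (he ▸ hk')⟩

-- The incremental build, generalized over the accumulated partial scenarios.
theorem foldl_build (configs : List (String × List Int)) (acc : List (List (String × Int)))
    (hnd : (configs.map Prod.fst).Nodup)
    (hdisj : ∀ s ∈ acc, ∀ k ∈ configs.map Prod.fst, k ∉ s.map Prod.fst) :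
    configs.foldl
      (fun scenarios kv => scenarios.flatMap (fun s => kv.2.map (fun v => pyDictInsert s kv.1 v)))
      acc
    = acc.flatMap (fun s =>
        (pyProduct (configs.map Prod.snd)).map (fun p => s ++ (configs.map Prod.fst).zip p)) := by
  induction configs generalizing acc with
  | nil => simp [pyProduct]
  | cons kv rest ih =>
    obtain ⟨k, vs⟩ := kv
    simp only [List.map_cons] at hnd
    simp only [List.foldl_cons]
    have hstep : (acc.flatMap fun s => vs.map fun v => pyDictInsert s k v)
        = acc.flatMap fun s => vs.map fun v => s ++ [(k, v)] := by
      apply List.flatMap_congr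
      intro s hs
      apply List.map_congr_left
      intro v _
      exact pyDictInsert_fresh s k v (hdisj s hs k (by simp))
    rw [hstep, ih]
    · simp only [pyProduct, List.map_cons, List.flatMap_assoc, List.flatMap_map,
        List.map_flatMap, List.map_map]
      apply List.flatMap_congr
      intro s _
      apply List.flatMap_congr
      intro v _
      simp [Function.comp, List.zip_cons_cons, List.append_assoc]
    · exact hnd.of_cons
    · intro s hs k' hk'
      simp only [List.mem_flatMap, List.mem_map] at hs
      obtain ⟨s₀, hs₀, v, _, rfl⟩ := hs
      simp only [List.map_append, List.mem_append, List.map_cons, List.map_nil,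
        List.mem_singleton, not_or]
      refine ⟨hdisj s₀ hs₀ k' (List.mem_cons_of_mem _ hk'), fun he => ?_⟩
      exact (List.nodup_cons.mp hnd).1 (he ▸ hk')

-- ===== VERDICT (by name: the statement is the Claim_ definition above) =====
theorem generate_tests_scenarios_spec : Claim_equal_generate_tests_scenarios := by
  intro configs _ hpre
  unfold Spec_generate_tests_scenarios generate_tests_scenarios generate_tests_scenarios_alt
  rw [foldl_build configs [[]] hpre (by simp)]
  simp only [List.flatMap_cons, List.flatMap_nil, List.append_nil, List.nil_append]
  apply List.map_congr_left
  intro p _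
  exact foldl_insert_zip (configs.map Prod.fst) p [] (by simpa using hpre) (by simp)
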